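-- pv_equiv track=rewrite | github.com/AlbertMargaryan/Python_CPS109_Problems_Solution | main.py | tukeys_ninthers
-- ===== SOURCE A (Python) =====
-- def tukeys_ninthers(items):
--     if len(items) == 1:
--         return items[0]
--
--     def find_median_three_elements(t):
--         if t[0] <= t[1] <= t[2] or t[2] <= t[1] <= t[0]:
--             return t[1]
--         elif t[1] <= t[0] <= t[2] or t[2] <= t[0] <= t[1]:
--             return t[0]
--         else:
--             return t[2]
--
--     newItems = []
--     for i in range(0, len(items), 3):
--         tuple3 = items[i:i + 3]
--         newItems.append(find_median_three_elements(tuple3))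
--     return tukeys_ninthers(newItems)
-- ===== SOURCE B (Python) =====
-- def tukeys_ninthers(items):
--     # Iterative reduction; branchless median-of-three via a min/max comparator network.
--     def med3(a, b, c):
--         return max(min(a, b), min(max(a, b), c))
--     while len(items) > 1:
--         items = [med3(items[i], items[i + 1], items[i + 2])
--                  for i in range(0, len(items), 3)]
--     return items[0]
-- ===== Notes on version B (the rewrite author's own statement) =====
-- stated objective: simpler
-- what changed: Replaces the outer recursion with a while loop that reassigns the list, and the chained-comparison median-of-three with a branchless min/max comparator network; Pre_ restricts to lengths that are powers of 3, exactly the inputs on which A terminates without raising (otherwise A hits IndexError on a short trailing group or RecursionError on []).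
import Mathlib
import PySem

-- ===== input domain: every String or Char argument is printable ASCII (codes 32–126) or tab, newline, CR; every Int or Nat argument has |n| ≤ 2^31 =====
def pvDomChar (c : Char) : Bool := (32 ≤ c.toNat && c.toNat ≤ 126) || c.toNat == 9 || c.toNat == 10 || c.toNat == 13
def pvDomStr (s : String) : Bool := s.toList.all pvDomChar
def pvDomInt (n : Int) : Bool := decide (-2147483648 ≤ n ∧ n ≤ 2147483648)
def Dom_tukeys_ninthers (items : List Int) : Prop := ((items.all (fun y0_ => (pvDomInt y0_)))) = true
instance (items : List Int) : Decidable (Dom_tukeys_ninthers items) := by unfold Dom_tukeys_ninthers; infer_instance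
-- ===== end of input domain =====

-- B replaces A's outer recursion by a while loop and the chained-comparison median-of-three
-- by a branchless min/max comparator network (objective: simpler).

-- Termination lemma cited by both ports' decreasing_by (must precede them).
theorem pv_len_pyRange3_lt (n : Int) (h : 1 < n) :
    ((PySem.List.pyRange 0 n 3).length : Int) < n := by
  rw [PySem.List.pyRange_of_pos 0 n (by norm_num)]
  simp only [List.length_map, List.length_range]
  split <;> omega

-- ===== PORT A =====
-- t[0]/t[1]/t[2] raise IndexError on short lists; Pre_ keeps every group at size 3,
-- so the pyGetD default 0 is never consulted on admitted inputs.
def pvFindMedianThree (t : List Int) : Int :=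
  let t0 := PySem.List.pyGetD t 0 0
  let t1 := PySem.List.pyGetD t 1 0
  let t2 := PySem.List.pyGetD t 2 0
  if (t0 ≤ t1 ∧ t1 ≤ t2) ∨ (t2 ≤ t1 ∧ t1 ≤ t0) then t1
  else if (t1 ≤ t0 ∧ t0 ≤ t2) ∨ (t2 ≤ t0 ∧ t0 ≤ t1) then t0
  else t2

def tukeys_ninthers (items : List Int) : Int :=
  if items.length = 1 then PySem.List.pyGetD items 0 0
  else if items.length = 0 then 0  -- totality guard: Python recurses forever on [] (outside Pre_)
  else
    tukeys_ninthers ((PySem.List.pyRange 0 (items.length : Int) 3).foldl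
      (fun acc i => acc ++ [pvFindMedianThree (PySem.List.slice items (some i) (some (i + 3)))]) [])
termination_by items.length
decreasing_by
  rename_i h1 h0
  rw [PySem.List.foldl_append_singleton_eq_map]
  simp only [List.nil_append, List.length_map]
  have := pv_len_pyRange3_lt (items.length : Int) (by omega)
  omega

-- ===== PORT B =====
def pvMed3 (a b c : Int) : Int := max (min a b) (min (max a b) c)

def tukeys_ninthers_alt (items : List Int) : Int :=
  if h : 1 < items.length then
    tukeys_ninthers_alt ((PySem.List.pyRange 0 (items.length : Int) 3).map (fun i =>
      pvMed3 (PySem.List.pyGetD items i 0) (PySem.List.pyGetD items (i + 1) 0)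
             (PySem.List.pyGetD items (i + 2) 0)))
  else PySem.List.pyGetD items 0 0
termination_by items.length
decreasing_by
  simp only [List.length_map]
  have := pv_len_pyRange3_lt (items.length : Int) (by omega)
  omega

-- ===== PRECONDITION & SPEC =====
-- Pre_ admits exactly the lengths that are powers of 3: on any other length A raises
-- (IndexError on a short trailing group, or RecursionError on the empty list).
def Pre_tukeys_ninthers (items : List Int) : Prop :=
  ∃ k ∈ Finset.range (items.length + 1), items.length = 3 ^ k

instance (items : List Int) : Decidable (Pre_tukeys_ninthers items) := by
  unfold Pre_tukeys_ninthers; infer_instance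

def pvWitness_tukeys_ninthers : List Int := [5, 1, 9]

def Spec_tukeys_ninthers (items : List Int) (out : Int) : Prop := out = tukeys_ninthers_alt items
instance (items : List Int) (out : Int) : Decidable (Spec_tukeys_ninthers items out) := by unfold Spec_tukeys_ninthers; infer_instance

-- ===== CLAIM (what is proved, stated in full; the proofs are below) =====
def Claim_equal_tukeys_ninthers : Prop := ∀ (items : List Int), Dom_tukeys_ninthers items → Pre_tukeys_ninthers items → Spec_tukeys_ninthers items (tukeys_ninthers items)

-- ===== LEMMAS AND PROOFS =====

theorem pv_med3_eq (a b c : Int) : pvFindMedianThree [a, b, c] = pvMed3 a b c := by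
  simp only [pvFindMedianThree, pvMed3, PySem.List.pyGetD_ofNat', List.getD]
  simp only [List.getElem?_cons_zero, List.getElem?_cons_succ, Option.getD_some]
  rcases le_total a b with hab | hab <;> rcases le_total b c with hbc | hbc <;>
    rcases le_total a c with hac | hac <;>
      simp only [max_def, min_def] <;> split_ifs <;> omega

theorem pv_slice3 (items : List Int) (i : Int) (h0 : 0 ≤ i)
    (h3 : i + 3 ≤ (items.length : Int)) :
    PySem.List.slice items (some i) (some (i + 3)) =
      [PySem.List.pyGetD items i 0, PySem.List.pyGetD items (i + 1) 0,
       PySem.List.pyGetD items (i + 2) 0] := by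
  have hj3 : i.toNat + 3 ≤ items.length := by omega
  have hdl : 3 ≤ (items.drop i.toNat).length := by simp; omega
  rw [PySem.List.slice_of_nonneg items h0 (by omega) (by omega) h3]
  have ht : (i + 3).toNat - i.toNat = 3 := by omega
  rw [ht]
  rcases hd : items.drop i.toNat with _ | ⟨a, _ | ⟨b, _ | ⟨c, t⟩⟩⟩ <;>
    rw [hd] at hdl <;> simp at hdl <;> try omega
  have ga : items[i.toNat]'(by omega) = a := by
    have h := (List.getElem_drop (xs := items) (i := i.toNat) (j := 0)
      (h := by simp [hd])).symm
    simpa [hd] using h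
  have gb : items[i.toNat + 1]'(by omega) = b := by
    have h := (List.getElem_drop (xs := items) (i := i.toNat) (j := 1)
      (h := by simp [hd])).symm
    simpa [hd] using h
  have gc : items[i.toNat + 2]'(by omega) = c := by
    have h := (List.getElem_drop (xs := items) (i := i.toNat) (j := 2)
      (h := by simp [hd])).symm
    simpa [hd] using h
  rw [PySem.List.pyGetD_eq_getElem items 0 h0 (by omega),
      PySem.List.pyGetD_eq_getElem items 0 (by omega : (0:Int) ≤ i + 1) (by omega),
      PySem.List.pyGetD_eq_getElem items 0 (by omega : (0:Int) ≤ i + 2) (by omega)]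
  have e1 : (i + 1).toNat = i.toNat + 1 := by omega
  have e2 : (i + 2).toNat = i.toNat + 2 := by omega
  simp only [e1, e2, ga, gb, gc, List.take]

-- One reduction step: A's foldl-built median list equals B's mapped median list
-- whenever the length is a multiple of 3.
theorem pv_step_eq (items : List Int) (hdvd : 3 ∣ items.length) :
    (PySem.List.pyRange 0 (items.length : Int) 3).foldl
      (fun acc i => acc ++ [pvFindMedianThree (PySem.List.slice items (some i) (some (i + 3)))]) []
    = (PySem.List.pyRange 0 (items.length : Int) 3).map (fun i =>
        pvMed3 (PySem.List.pyGetD items i 0) (PySem.List.pyGetD items (i + 1) 0)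
               (PySem.List.pyGetD items (i + 2) 0)) := by
  rw [PySem.List.foldl_append_singleton_eq_map, List.nil_append]
  apply List.map_congr_left
  intro i hi
  rw [PySem.List.mem_pyRange_iff_of_pos (by norm_num)] at hi
  obtain ⟨h0, hlt, hdvd'⟩ := hi
  have hdvd'' : (3 : Int) ∣ (items.length : Int) := by exact_mod_cast hdvd
  have h3 : i + 3 ≤ (items.length : Int) := by omega
  rw [pv_slice3 items i h0 h3, pv_med3_eq]

theorem pv_len_pyRange3_dvd (n : Int) (h : 0 ≤ n) (hdvd : 3 ∣ n) :
    ((PySem.List.pyRange 0 n 3).length : Int) = n / 3 := by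
  rw [PySem.List.pyRange_of_pos 0 n (by norm_num)]
  simp only [List.length_map, List.length_range]
  split <;> omega

theorem pv_main : ∀ (n : Nat) (items : List Int), items.length = n →
    Pre_tukeys_ninthers items → tukeys_ninthers items = tukeys_ninthers_alt items := by
  intro n
  induction n using Nat.strong_induction_on with
  | _ n ih =>
    intro items hlen hpre
    obtain ⟨k, _, hk⟩ := hpre
    by_cases h1 : items.length = 1
    · rw [tukeys_ninthers, tukeys_ninthers_alt]
      simp [h1]
    · -- length = 3^k with k ≥ 1
      have hk1 : 1 ≤ k := by
        rcases Nat.eq_zero_or_pos k with h | h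
        · simp [h] at hk; omega
        · omega
      have hgt : 1 < items.length := by
        rw [hk]
        calc 1 < 3 ^ 1 := by norm_num
          _ ≤ 3 ^ k := Nat.pow_le_pow_right (by norm_num) hk1
      have hdvd : 3 ∣ items.length := by
        rw [hk]; exact dvd_pow_self 3 (by omega)
      rw [tukeys_ninthers, tukeys_ninthers_alt]
      simp only [h1, if_false, if_neg (by omega : ¬ items.length = 0), dif_pos hgt]
      rw [pv_step_eq items hdvd]
      set N := (PySem.List.pyRange 0 (items.length : Int) 3).map (fun i =>
        pvMed3 (PySem.List.pyGetD items i 0) (PySem.List.pyGetD items (i + 1) 0)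
               (PySem.List.pyGetD items (i + 2) 0)) with hN
      have hNlen : N.length = items.length / 3 := by
        have := pv_len_pyRange3_dvd (items.length : Int) (by positivity)
          (by exact_mod_cast hdvd)
        rw [hN, List.length_map]
        omega
      have hpow : N.length = 3 ^ (k - 1) := by
        rw [hNlen, hk]
        rcases Nat.exists_eq_add_of_le hk1 with ⟨m, hm⟩
        subst hm
        simp [pow_succ, pow_add]
      apply ih N.length
      · omega
      · rfl
      · exact ⟨k - 1, by
          simp only [Finset.mem_range]
          have : k - 1 < 3 ^ (k - 1) := Nat.lt_pow_self (by norm_num)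
          omega, hpow⟩

-- ===== VERDICT (by name: the statement is the Claim_ definition above) =====
theorem tukeys_ninthers_spec : Claim_equal_tukeys_ninthers := by
  intro items _ hpre
  unfold Spec_tukeys_ninthers
  exact pv_main items.length items rfl hpre
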